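-- pv_equiv track=rewrite | github.com/Seohyeong/AoC | day_22/day_22.py | get_nth_num
-- ===== SOURCE A (Python) =====
-- from collections import defaultdict
--
-- def mix(next_num, num):
--     return num ^ next_num
--
-- def prune(num):
--     return num % 16777216
--
-- cache = defaultdict(int)
--
-- def get_nth_num(num: int, n: int) -> int:
--     for _ in range(n):
--         if num in cache:
--             num = cache[num]
--         else:
--             next_num = prune(mix(num * 64, num))
--             next_num = prune(mix(next_num // 32, next_num))
--             next_num = prune(mix(next_num * 2048, next_num))
--             cache[num] = next_num
--             num = next_num
--     return num
-- ===== SOURCE B (Python) =====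
-- PRUNE = 16777216
--
--
-- def _step(x):
--     x = (x ^ (x * 64)) % PRUNE
--     x = (x ^ (x // 32)) % PRUNE
--     x = (x ^ (x * 2048)) % PRUNE
--     return x
--
--
-- def get_nth_num(num: int, n: int) -> int:
--     # Floyd (tortoise/hare) cycle detection on the deterministic orbit,
--     # O(1) extra memory: once a cycle is found, jump to index
--     # mu + (n - mu) % lam of the orbit.
--     if n <= 0:
--         return num
--     t = _step(num)
--     h = _step(_step(num))
--     i = 1
--     while t != h and i < n:
--         t = _step(t)
--         h = _step(_step(h))
--         i += 1
--     if t != h: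
--         return t  # i == n: no cycle within n steps, t is the n-th number
--     # find mu, the start of the cycle (first index j with orbit[j] == orbit[j+i])
--     mu = 0
--     p1 = num
--     p2 = t
--     while p1 != p2:
--         p1 = _step(p1)
--         p2 = _step(p2)
--         mu += 1
--     # find lam, the cycle length
--     lam = 1
--     q = _step(p1)
--     while q != p1:
--         q = _step(q)
--         lam += 1
--     idx = mu + (n - mu) % lam
--     x = num
--     for _ in range(idx):
--         x = _step(x)
--     return x
-- ===== Notes on version B (the rewrite author's own statement) =====
-- stated objective: alternative
-- what changed: B replaces A's step-by-step simulation of all n steps through a memo dict by Floyd (tortoise/hare) cycle detection on the deterministic orbit with O(1) extra memory, jumping to index mu + (n - mu) % lam once a cycle is found.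
import Mathlib
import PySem

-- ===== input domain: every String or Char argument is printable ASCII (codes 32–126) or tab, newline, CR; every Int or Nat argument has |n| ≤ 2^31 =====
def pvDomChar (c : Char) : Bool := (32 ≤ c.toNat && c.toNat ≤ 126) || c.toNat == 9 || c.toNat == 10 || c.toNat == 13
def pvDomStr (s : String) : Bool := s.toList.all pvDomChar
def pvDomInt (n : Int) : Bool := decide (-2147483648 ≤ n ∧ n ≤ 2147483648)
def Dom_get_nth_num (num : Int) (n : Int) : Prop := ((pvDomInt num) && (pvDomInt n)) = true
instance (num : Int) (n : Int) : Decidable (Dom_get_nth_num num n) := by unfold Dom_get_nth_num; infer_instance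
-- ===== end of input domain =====

-- B replaces A's step-by-step simulation of all n PRNG steps (through a memo dict) by
-- Floyd (tortoise/hare) cycle detection on the deterministic orbit with O(1) extra memory,
-- jumping to index mu + (n - mu) % lam once a cycle is found (alternative algorithm).
-- (A's module-level cache persists across calls in Python; it never changes A's return
-- value, and is ported as a per-call dict.)


-- ===== PORT A =====
-- def mix(next_num, num): return num ^ next_num
def mix (next_num : Int) (num : Int) : Int := PySem.Int.bxor num next_num

-- def prune(num): return num % 16777216
def prune (num : Int) : Int := PySem.Int.mod num 16777216

-- the body of A's for-loop (cache hit, else compute the three mix/prune lines and memoize);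
-- the cache is only ever read back through 'in'/lookup with int keys, so it is backed by
-- Std.HashMap Int Int (same first-match get?/insert semantics as a Python dict here)
def pvLoopA (st : Int × Std.HashMap Int Int) (_i : Int) : Int × Std.HashMap Int Int :=
  let num := st.1
  let cache := st.2
  match cache[num]? with
  | some v => (v, cache)
  | none =>
    let next_num := prune (mix (num * 64) num)
    let next_num := prune (mix (PySem.Int.floordiv next_num 32) next_num)
    let next_num := prune (mix (next_num * 2048) next_num)
    (next_num, cache.insert num next_num)

def get_nth_num (num : Int) (n : Int) : Int :=
  ((PySem.List.pyRange 0 n 1).foldl pvLoopA (num, Std.HashMap.emptyWithCapacity)).1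

-- ===== PORT B =====
-- def _step(x): the three xorshift rounds of Source B
def pvStep (x : Int) : Int :=
  let x := PySem.Int.mod (PySem.Int.bxor x (x * 64)) 16777216
  let x := PySem.Int.mod (PySem.Int.bxor x (PySem.Int.floordiv x 32)) 16777216
  PySem.Int.mod (PySem.Int.bxor x (x * 2048)) 16777216

-- Source B's first while loop ('while t != h and i < n'); fuel (n - i).toNat encodes 'i < n'
def pvFloyd1 (fuel : Nat) (t h i : Int) : Int × Int × Int :=
  match fuel with
  | 0 => (t, h, i)
  | f + 1 =>
    if t = h then (t, h, i)
    else pvFloyd1 f (pvStep t) (pvStep (pvStep h)) (i + 1)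

-- Source B's 'while p1 != p2' loop; the fuel passed in the call below is proved sufficient,
-- so the fuel-0 branch is unreachable
def pvFloydMu (fuel : Nat) (p1 p2 mu : Int) : Int × Int :=
  match fuel with
  | 0 => (mu, p1)
  | f + 1 =>
    if p1 = p2 then (mu, p1) else pvFloydMu f (pvStep p1) (pvStep p2) (mu + 1)

-- Source B's 'while q != p1' loop; fuel likewise proved sufficient
def pvFloydLam (fuel : Nat) (q p1 lam : Int) : Int :=
  match fuel with
  | 0 => lam
  | f + 1 => if q = p1 then lam else pvFloydLam f (pvStep q) p1 (lam + 1)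

def get_nth_num_alt (num : Int) (n : Int) : Int :=
  if n ≤ 0 then num
  else
    let r := pvFloyd1 (n - 1).toNat (pvStep num) (pvStep (pvStep num)) 1
    let t := r.1
    let h := r.2.1
    let i := r.2.2
    if t ≠ h then t
    else
      let m := pvFloydMu (i + 1).toNat num t 0
      let mu := m.1
      let p1 := m.2
      let lam := pvFloydLam i.toNat (pvStep p1) p1 1
      let idx := mu + PySem.Int.mod (n - mu) lam
      (PySem.List.pyRange 0 idx 1).foldl (fun x _ => pvStep x) num

-- ===== PRECONDITION & SPEC =====
def Spec_get_nth_num (num : Int) (n : Int) (out : Int) : Prop := out = get_nth_num_alt num n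
instance (num : Int) (n : Int) (out : Int) : Decidable (Spec_get_nth_num num n out) := by unfold Spec_get_nth_num; infer_instance

-- ===== CLAIM (what is proved, stated in full; the proofs are below) =====
def Claim_equal_get_nth_num : Prop := ∀ (num : Int) (n : Int), Dom_get_nth_num num n → Spec_get_nth_num num n (get_nth_num num n)

-- ===== LEMMAS AND PROOFS =====

-- A's loop body, on a cache miss, computes exactly pvStep.
theorem pvLoopA_miss (num : Int) (cache : Std.HashMap Int Int) (i : Int)
    (h : cache[num]? = none) :
    pvLoopA (num, cache) i = (pvStep num, cache.insert num (pvStep num)) := by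
  simp [pvLoopA, h, pvStep, mix, prune]

-- A's fold, started from any cache whose every entry memoizes pvStep, iterates pvStep.
theorem foldA_eq (l : List Int) : ∀ (num : Int) (cache : Std.HashMap Int Int),
    (∀ y v, cache[y]? = some v → v = pvStep y) →
    (l.foldl pvLoopA (num, cache)).1 = pvStep^[l.length] num := by
  induction l with
  | nil => intro num cache _; simp
  | cons a l ih =>
    intro num cache hc
    rw [List.foldl_cons]
    cases hget : cache[num]? with
    | some v =>
      have hv : v = pvStep num := hc num v hget
      have hstep : pvLoopA (num, cache) a = (v, cache) := by
        simp [pvLoopA, hget]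
      rw [hstep, ih v cache hc, hv, List.length_cons,
        ← Function.iterate_succ_apply]
    | none =>
      rw [pvLoopA_miss num cache a hget]
      rw [ih (pvStep num) (cache.insert num (pvStep num)) ?_, List.length_cons,
        ← Function.iterate_succ_apply]
      intro y v hyv
      rw [Std.HashMap.getElem?_insert] at hyv
      split at hyv
      · rename_i heq
        cases hyv
        rw [show y = num from (beq_iff_eq.mp heq).symm]
      · exact hc y v hyv

theorem getA_eq (num n : Int) : get_nth_num num n = pvStep^[n.toNat] num := by
  unfold get_nth_num
  rw [foldA_eq _ num Std.HashMap.emptyWithCapacity (by intro y v h; simp at h)]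
  congr 1
  rw [PySem.List.length_pyRange_one]
  omega

-- Periodicity: once f^[s+p] a = f^[s] a, indices past s can be reduced mod p.
theorem iter_period {α : Type} (f : α → α) (a : α) (s p : Nat) (hp : 0 < p)
    (h : f^[s + p] a = f^[s] a) : ∀ q : Nat, f^[s + q] a = f^[s + q % p] a := by
  intro q
  induction q using Nat.strong_induction_on with
  | _ q ih =>
    by_cases hq : q < p
    · rw [Nat.mod_eq_of_lt hq]
    · rw [Nat.not_lt] at hq
      have h1 : f^[s + q] a = f^[s + (q - p)] a := by
        have he : s + q = (q - p) + (s + p) := by omega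
        rw [he, Function.iterate_add_apply, h, ← Function.iterate_add_apply]
        congr 1
        omega
      rw [h1, ih (q - p) (by omega), Nat.mod_eq_sub_mod hq]

-- a foldl whose body ignores the list elements iterates its function length-many times
theorem foldl_const_iterate {α β : Type} (f : α → α) (l : List β) :
    ∀ x : α, l.foldl (fun x _ => f x) x = f^[l.length] x := by
  induction l with
  | nil => intro x; simp
  | cons a l ih =>
    intro x
    rw [List.foldl_cons, ih, List.length_cons, ← Function.iterate_succ_apply]

-- phase 1: the tortoise/hare loop maintains t = orbit[i], h = orbit[2i]
theorem pvFloyd1_spec (num : Int) : ∀ (fuel : Nat) (t h i n : Int),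
    1 ≤ i → i ≤ n → fuel = (n - i).toNat →
    t = pvStep^[i.toNat] num → h = pvStep^[2 * i.toNat] num →
    ∃ t' h' i', pvFloyd1 fuel t h i = (t', h', i') ∧
      t' = pvStep^[i'.toNat] num ∧ h' = pvStep^[2 * i'.toNat] num ∧
      1 ≤ i' ∧ i' ≤ n ∧ (t' ≠ h' → i' = n) := by
  intro fuel
  induction fuel with
  | zero =>
    intro t h i n hi1 hin hfuel ht hh
    refine ⟨t, h, i, rfl, ht, hh, hi1, hin, fun _ => by omega⟩
  | succ f ih =>
    intro t h i n hi1 hin hfuel ht hh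
    unfold pvFloyd1
    by_cases hth : t = h
    · simp only [hth, if_true]
      exact ⟨h, h, i, rfl, hth ▸ ht, hh, hi1, hin, fun hc => absurd rfl hc⟩
    · simp only [if_neg hth]
      apply ih
      · omega
      · omega
      · omega
      · have : (i + 1).toNat = i.toNat + 1 := by omega
        rw [this, Function.iterate_succ_apply', ht]
      · have : 2 * (i + 1).toNat = 2 * i.toNat + 1 + 1 := by omega
        rw [this, Function.iterate_succ_apply', Function.iterate_succ_apply', hh]

-- phase 2: find the start of the cycle; given orbit[I] = orbit[2I] the two pointers
-- must meet within I steps, so the given fuel never runs out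
theorem pvFloydMu_spec (num : Int) : ∀ (fuel : Nat) (p1 p2 mu : Int) (M I : Nat),
    p1 = pvStep^[M] num → p2 = pvStep^[M + I] num → mu = (M : Int) →
    M ≤ I → fuel = I - M + 1 →
    pvStep^[I] num = pvStep^[I + I] num →
    ∃ M' : Nat, pvFloydMu fuel p1 p2 mu = ((M' : Int), pvStep^[M'] num) ∧
      M' ≤ I ∧ pvStep^[M'] num = pvStep^[M' + I] num := by
  intro fuel
  induction fuel with
  | zero => intro _ _ _ M I _ _ _ _ hfuel _; omega
  | succ f ih =>
    intro p1 p2 mu M I hp1 hp2 hmu hMI hfuel hI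
    unfold pvFloydMu
    by_cases heq : p1 = p2
    · simp only [if_pos heq]
      exact ⟨M, by rw [hmu, hp1], hMI, by rw [← hp1, heq, hp2]⟩
    · simp only [if_neg heq]
      have hMlt : M < I := by
        rcases Nat.lt_or_ge M I with h | h
        · exact h
        · exfalso
          have hMI' : M = I := by omega
          apply heq
          rw [hp1, hp2, hMI']
          exact hI
      apply ih (pvStep p1) (pvStep p2) (mu + 1) (M + 1) I
      · rw [Function.iterate_succ_apply', hp1]
      · rw [show M + 1 + I = (M + I) + 1 by omega, Function.iterate_succ_apply', hp2]
      · omega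
      · omega
      · omega
      · exact hI

-- phase 3: find the cycle length; orbit[M'+I] = orbit[M'] bounds the search by I
theorem pvFloydLam_spec (num : Int) (M' I : Nat) (hI :
    pvStep^[M' + I] num = pvStep^[M'] num) :
    ∀ (fuel : Nat) (q lam : Int) (L : Nat),
    q = pvStep^[M' + L] num → lam = (L : Int) → 1 ≤ L → L ≤ I → fuel = I - L + 1 →
    ∃ L' : Nat, pvFloydLam fuel q (pvStep^[M'] num) lam = (L' : Int) ∧
      1 ≤ L' ∧ pvStep^[M' + L'] num = pvStep^[M'] num := by
  intro fuel
  induction fuel with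
  | zero => intro _ _ L _ _ _ hLI hfuel; omega
  | succ f ih =>
    intro q lam L hq hlam hL1 hLI hfuel
    unfold pvFloydLam
    by_cases heq : q = pvStep^[M'] num
    · simp only [if_pos heq]
      exact ⟨L, hlam, hL1, by rw [← hq, heq]⟩
    · simp only [if_neg heq]
      have hLlt : L < I := by
        rcases Nat.lt_or_ge L I with h | h
        · exact h
        · exfalso
          have : L = I := by omega
          exact heq (by rw [hq, this, hI])
      apply ih (pvStep q) (lam + 1) (L + 1)
      · rw [show M' + (L + 1) = (M' + L) + 1 by omega, Function.iterate_succ_apply', hq]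
      · omega
      · omega
      · omega
      · omega

theorem getB_eq (num n : Int) : get_nth_num_alt num n = pvStep^[n.toNat] num := by
  unfold get_nth_num_alt
  by_cases hn : n ≤ 0
  · simp only [if_pos hn]
    have : n.toNat = 0 := by omega
    rw [this, Function.iterate_zero_apply]
  · simp only [if_neg hn]
    have hn1 : 1 ≤ n := by omega
    obtain ⟨t', h', i', heq, ht, hh, hi1, hin, hne⟩ :=
      pvFloyd1_spec num (n - 1).toNat (pvStep num) (pvStep (pvStep num)) 1 n
        (by omega) hn1 (by omega)
        (by norm_num)
        (by norm_num)
    rw [heq]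
    by_cases hth : t' = h'
    · simp only [hth, ne_eq, not_true_eq_false, if_false]
      -- cycle found: orbit[I] = orbit[2I] with I = i'.toNat ≥ 1
      set I := i'.toNat with hIdef
      have hI1 : 1 ≤ I := by omega
      have hcyc : pvStep^[I] num = pvStep^[I + I] num := by
        rw [← ht, hth, hh, two_mul]
      obtain ⟨M', hmu_eq, hM'I, hM'⟩ :=
        pvFloydMu_spec num (i' + 1).toNat num h' 0 0 I
          (by simp) (by rw [← hth, ht]; congr 1; omega) rfl
          (by omega) (by omega) hcyc
      rw [hmu_eq]
      obtain ⟨L', hlam_eq, hL'1, hL'⟩ :=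
        pvFloydLam_spec num M' I (by rw [← hM']) i'.toNat (pvStep (pvStep^[M'] num))
          1 1 (by rw [Function.iterate_succ_apply']) rfl (by omega) (by omega) (by omega)
      rw [hlam_eq]
      have hL'pos : (0 : Int) < (L' : Int) := by exact_mod_cast hL'1
      have hmodnn : 0 ≤ PySem.Int.mod (n - (M' : Int)) (L' : Int) :=
        PySem.Int.mod_nonneg _ hL'pos
      have hmem : PySem.Int.mod (n - (M' : Int)) (L' : Int)
          = (n - (M' : Int)) % (L' : Int) := PySem.Int.mod_eq_emod_of_pos hL'pos
      set idx := (M' : Int) + PySem.Int.mod (n - (M' : Int)) (L' : Int) with hidx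
      have hidx0 : 0 ≤ idx := by omega
      rw [foldl_const_iterate, PySem.List.length_pyRange_one]
      -- reduce n.toNat past M' modulo L'
      have hM'n : M' ≤ n.toNat := by omega
      have hper : pvStep^[M' + L'] num = pvStep^[M'] num := hL'
      have hred := iter_period pvStep num M' L' (by omega) hper (n.toNat - M')
      rw [show M' + (n.toNat - M') = n.toNat by omega] at hred
      rw [hred]
      congr 1
      have hc1 : ((n.toNat - M' : Nat) : Int) = n - (M' : Int) := by omega
      have hc2 : (((n.toNat - M') % L' : Nat) : Int)
          = (n - (M' : Int)) % (L' : Int) := by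
        rw [Int.natCast_mod, hc1]
      omega
    · rw [if_pos hth, ht, hne hth]

-- ===== VERDICT (by name: the statement is the Claim_ definition above) =====
theorem get_nth_num_spec : Claim_equal_get_nth_num := by
  intro num n _
  unfold Spec_get_nth_num
  rw [getA_eq, getB_eq]
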